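-- pv_equiv track=rewrite | github.com/nonasking/algorithm-python | list/examples/skill_tree.py | remake_skills
-- ===== SOURCE A (Python) =====
-- def remake_skills(skill, skill_tree):
--     result = []
--
--     for alphabet in skill_tree:
--         if alphabet in skill and alphabet not in result:
--             result.append(skill.index(alphabet))
--
--     if len(result) == 0:
--         return True
--
--     return result == sorted(result) and len(result) == (max(result)+1) and result[0] == 0
-- ===== SOURCE B (Python) =====
-- def remake_skills(skill, skill_tree):
--     # Single streaming pass: no result list, no sorted(), no max().
--     count = 0
--     first = None
--     prev = None
--     monotone = True
--     for ch in skill_tree: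
--         if ch in skill:
--             idx = skill.index(ch)
--             if first is None:
--                 first = idx
--             if prev is not None and idx < prev:
--                 monotone = False
--             prev = idx
--             count += 1
--     if count == 0:
--         return True
--     return monotone and first == 0 and count == prev + 1
-- ===== Notes on version B (the rewrite author's own statement) =====
-- stated objective: faster
-- what changed: Replaces building an index list (with a per-character membership scan of the growing list and a final sorted()/max()/indexing pass) by a single streaming pass maintaining count, first index, previous index and a monotonicity flag, returning count==0 or (monotone and first==0 and count==prev+1).
import Mathlib
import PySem

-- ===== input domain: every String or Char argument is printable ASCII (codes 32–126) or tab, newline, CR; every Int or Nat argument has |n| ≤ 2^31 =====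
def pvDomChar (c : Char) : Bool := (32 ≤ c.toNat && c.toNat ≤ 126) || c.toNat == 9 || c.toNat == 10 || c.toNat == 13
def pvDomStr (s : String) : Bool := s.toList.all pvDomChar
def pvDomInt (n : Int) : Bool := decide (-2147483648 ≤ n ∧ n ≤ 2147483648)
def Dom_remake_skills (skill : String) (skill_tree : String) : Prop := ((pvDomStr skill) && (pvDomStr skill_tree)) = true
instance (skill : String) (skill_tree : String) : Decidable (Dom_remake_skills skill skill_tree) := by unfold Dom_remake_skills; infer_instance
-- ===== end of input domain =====

-- B streams the check in one pass (count/first/prev/monotone); A builds the index list and checks it with sorted()/max(). Same value everywhere.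

-- ===== PORT A =====
-- Python '==' between a str and an int is always False, so 'alphabet not in result' never filters anything
def pyCharIntEq (_c : Char) (_i : Int) : Bool := false

def remake_skills (skill : String) (skill_tree : String) : Bool :=
  let result : List Int := skill_tree.toList.foldl (fun result alphabet =>
    if PySem.Str.isIn (String.singleton alphabet) skill
        && result.all (fun r => !pyCharIntEq alphabet r) then
      result ++ [PySem.Str.find skill (String.singleton alphabet)]
    else result) []
  if result.length = 0 then true
  else (result == PySem.List.sorted result (fun x => x) false)
       -- result is nonempty in this branch, so Python's max(result) and result[0] do not raise
       && ((result.length : Int) == (PySem.List.max? result (fun x => x)).getD 0 + 1)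
       && (PySem.List.pyGet? result 0 == some (0 : Int))

-- ===== PORT B =====
def remake_skills_alt (skill : String) (skill_tree : String) : Bool :=
  let st := skill_tree.toList.foldl (fun (st : Int × Option Int × Option Int × Bool) ch =>
    if PySem.Str.isIn (String.singleton ch) skill then
      let idx := PySem.Str.find skill (String.singleton ch)
      let first := match st.2.1 with | none => some idx | some f => some f
      let monotone := match st.2.2.1 with
        | some p => if idx < p then false else st.2.2.2
        | none => st.2.2.2
      (st.1 + 1, first, some idx, monotone)
    else st) ((0 : Int), none, none, true)
  if st.1 = 0 then true
  -- prev is not None whenever count ≠ 0, so Python's 'prev + 1' does not raise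
  else st.2.2.2 && (st.2.1 == some (0 : Int))
       && (match st.2.2.1 with | some p => st.1 == p + 1 | none => false)

-- ===== PRECONDITION & SPEC =====
def Spec_remake_skills (skill : String) (skill_tree : String) (out : Bool) : Prop := out = remake_skills_alt skill skill_tree
instance (skill : String) (skill_tree : String) (out : Bool) : Decidable (Spec_remake_skills skill skill_tree out) := by unfold Spec_remake_skills; infer_instance

-- ===== CLAIM (what is proved, stated in full; the proofs are below) =====
def Claim_equal_remake_skills : Prop := ∀ (skill : String) (skill_tree : String), Dom_remake_skills skill skill_tree → Spec_remake_skills skill skill_tree (remake_skills skill skill_tree)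

-- ===== LEMMAS AND PROOFS =====

-- the common index stream both programs process
def pvIdxs (skill : String) (cs : List Char) : List Int :=
  (cs.filter (fun c => PySem.Str.isIn (String.singleton c) skill)).map
    (fun c => PySem.Str.find skill (String.singleton c))

theorem pvIdxs_append (skill : String) (cs : List Char) (c : Char) :
    pvIdxs skill (cs ++ [c]) =
      pvIdxs skill cs ++
        (if PySem.Str.isIn (String.singleton c) skill then
          [PySem.Str.find skill (String.singleton c)] else []) := by
  simp only [pvIdxs, List.filter_append, List.map_append]
  split_ifs with h <;> simp_all

theorem aFold_eq (skill : String) (cs : List Char) (r0 : List Int) :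
    cs.foldl (fun result alphabet =>
      if PySem.Str.isIn (String.singleton alphabet) skill
          && result.all (fun r => !pyCharIntEq alphabet r) then
        result ++ [PySem.Str.find skill (String.singleton alphabet)]
      else result) r0 = r0 ++ pvIdxs skill cs := by
  induction cs generalizing r0 with
  | nil => simp [pvIdxs]
  | cons c cs ih =>
      rw [List.foldl_cons, ih]
      simp only [pvIdxs, List.filter_cons, pyCharIntEq, Bool.not_false]
      by_cases h : PySem.Str.isIn (String.singleton c) skill = true <;>
        simp_all [pvIdxs]

def pvBState (l : List Int) : Int × Option Int × Option Int × Bool :=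
  ((l.length : Int), l.head?, l.getLast?, decide (List.Pairwise (· ≤ ·) l))

theorem pairwise_le_getLast (l : List Int) (p : Int)
    (h : List.Pairwise (· ≤ ·) l) (hp : l.getLast? = some p) : ∀ a ∈ l, a ≤ p := by
  rcases List.getLast?_eq_some_iff.mp hp with ⟨l', rfl⟩
  intro a ha
  rcases List.mem_append.mp ha with h' | h'
  · exact (List.pairwise_append.mp h).2.2 a h' p (by simp)
  · simp only [List.mem_singleton] at h'
    omega

theorem pvBState_append (l : List Int) (x : Int) :
    pvBState (l ++ [x]) =
      ((pvBState l).1 + 1,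
       (match (pvBState l).2.1 with | none => some x | some f => some f),
       some x,
       (match (pvBState l).2.2.1 with
        | some p => if x < p then false else (pvBState l).2.2.2
        | none => (pvBState l).2.2.2)) := by
  simp only [pvBState]
  refine Prod.ext (by push_cast; simp) (Prod.ext ?_ (Prod.ext (by simp) ?_))
  · cases l <;> simp
  · cases hl : l.getLast? with
    | none =>
        have : l = [] := List.getLast?_eq_none_iff.mp hl
        subst this; simp
    | some p =>
        simp only
        split_ifs with hx
        · -- x < last: appending x breaks monotonicity
          simp only [decide_eq_false_iff_not]
          intro hpair
          have := (List.pairwise_append.mp hpair).2.2 p (List.mem_of_getLast? hl) x (by simp)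
          omega
        · -- last ≤ x: monotone is preserved exactly
          rw [Bool.eq_iff_iff, decide_eq_true_eq, decide_eq_true_eq, List.pairwise_append]
          constructor
          · rintro ⟨h1, -, -⟩; exact h1
          · intro h1
            refine ⟨h1, List.pairwise_singleton _ _, fun a ha b hb => ?_⟩
            simp only [List.mem_singleton] at hb; subst hb
            have := pairwise_le_getLast l p h1 hl a ha
            omega

theorem bFold_eq (skill : String) (cs : List Char) :
    cs.foldl (fun (st : Int × Option Int × Option Int × Bool) ch =>
      if PySem.Str.isIn (String.singleton ch) skill then
        let idx := PySem.Str.find skill (String.singleton ch)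
        let first := match st.2.1 with | none => some idx | some f => some f
        let monotone := match st.2.2.1 with
          | some p => if idx < p then false else st.2.2.2
          | none => st.2.2.2
        (st.1 + 1, first, some idx, monotone)
      else st) ((0 : Int), none, none, true) = pvBState (pvIdxs skill cs) := by
  induction cs using List.reverseRecOn with
  | nil => simp [pvBState, pvIdxs]
  | append_singleton cs c ih =>
      rw [List.foldl_append, ih, pvIdxs_append, List.foldl_cons, List.foldl_nil]
      by_cases h : PySem.Str.isIn (String.singleton c) skill = true
      · simp only [h, if_true, pvBState_append]
      · simp only [h, if_false, Bool.false_eq_true, List.append_nil]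

-- final check on the common stream: A's list tests agree with B's streamed checks
theorem final_eq (l : List Int) :
    (if l.length = 0 then true
     else (l == PySem.List.sorted l (fun x => x) false)
       && ((l.length : Int) == (PySem.List.max? l (fun x => x)).getD 0 + 1)
       && (PySem.List.pyGet? l 0 == some (0 : Int)))
    = (if ((l.length : Int)) = 0 then true
       else decide (List.Pairwise (· ≤ ·) l) && (l.head? == some (0 : Int))
         && (match l.getLast? with | some p => ((l.length : Int)) == p + 1 | none => false)) := by
  rcases l with _ | ⟨a, t⟩
  · simp
  · have h0 : ¬ ((a :: t).length = 0) := by simp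
    have h0' : ¬ (((a :: t).length : Int) = 0) := by
      simp; omega
    rw [if_neg h0, if_neg h0']
    have hsorted : ((a :: t) == PySem.List.sorted (a :: t) (fun x => x) false) =
        decide (List.Pairwise (· ≤ ·) (a :: t)) := by
      rw [Bool.eq_iff_iff, beq_iff_eq, decide_eq_true_eq]
      constructor
      · intro h
        have := PySem.List.sorted_pairwise (a :: t) (fun x => x) (κ := Int)
        rw [← h] at this
        exact this
      · intro h
        exact (PySem.List.sorted_eq_self_of_pairwise _ _ h).symm
    have hget : (PySem.List.pyGet? (a :: t) 0 == some (0 : Int)) =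
        ((a :: t).head? == some (0 : Int)) := by
      simp [PySem.List.pyGet?, PySem.List.pyIdx?]
    rw [hsorted, hget]
    by_cases hc : List.Pairwise (· ≤ ·) (a :: t)
    · -- monotone: max(result) is the last element
      obtain ⟨m, hm⟩ : ∃ m, PySem.List.max? (a :: t) (fun x => x) = some m := by
        cases hmax : PySem.List.max? (a :: t) (fun x => x) with
        | none => simp [PySem.List.max?_eq_none_iff] at hmax
        | some m => exact ⟨m, rfl⟩
      obtain ⟨p, hp⟩ : ∃ p, (a :: t).getLast? = some p := by
        cases hlast : (a :: t).getLast? with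
        | none => simp [List.getLast?_eq_none_iff] at hlast
        | some p => exact ⟨p, rfl⟩
      have hmp : m = p := by
        have hmem : m ∈ a :: t := PySem.List.max?_mem hm
        have hple : ∀ y ∈ a :: t, y ≤ m := by
          intro y hy
          simpa using PySem.List.max?_isMax hm y hy
        have hpl : p ∈ a :: t := List.mem_of_getLast? hp
        have h1 := hple p hpl
        have h2 := pairwise_le_getLast _ p hc hp m hmem
        omega
      simp only [hm, hp, hmp, Option.getD_some, decide_eq_true hc, Bool.true_and]
      rw [Bool.and_comm]
    · rw [decide_eq_false hc]
      simp

-- ===== VERDICT (by name: the statement is the Claim_ definition above) =====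
theorem remake_skills_spec : Claim_equal_remake_skills := by
  intro skill skill_tree _
  unfold Spec_remake_skills remake_skills remake_skills_alt
  rw [aFold_eq, bFold_eq]
  simpa [pvBState] using final_eq (pvIdxs skill skill_tree.toList)
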